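-- pv_equiv track=rewrite | github.com/JavierGB99/DAA-practicas | DAA/Practica_2/sort.py | mezclar
-- ===== SOURCE A (Python) =====
-- def odd(a):
--     if a % 2 != 0:
--         return True
--
-- def even(a):
--     if a % 2 == 0:
--         return True
--
-- def mezclar(izq, dcha):
--     s = []
--     num_impares_izq = 0
--     num_impares_dcha = 0
--     i = 0
--     z = len(izq)
--     j = 0
--     l = len(dcha)
--     while (i < z and odd(izq[i])) or (j < l and odd(dcha[j])):
--
--         if i >= z:
--             s.append(dcha[j])
--             j += 1
--             num_impares_dcha += 1
--
--         elif even(izq[i]):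
--             s.append(dcha[j])
--             j += 1
--             num_impares_dcha += 1
--
--         elif j >= l:
--             s.append(izq[i])
--             i += 1
--             num_impares_izq += 1
--
--         elif even(dcha[j]):
--             s.append(izq[i])
--             i += 1
--             num_impares_izq += 1
--         elif izq[i] < dcha[j]:
--             s.append(izq[i])
--             i += 1
--             num_impares_izq += 1
--         else:
--             s.append(dcha[j])
--             j += 1
--             num_impares_dcha += 1
--
--     i = 0 + num_impares_izq
--     j = 0 + num_impares_dcha
--     while (i < z) or (j < l):
--
--         if i >= z:
--             s.append(dcha[j])
--             j += 1
--
--         elif j >= l: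
--             s.append(izq[i])
--             i += 1
--
--         elif izq[i] < dcha[j]:
--             s.append(izq[i])
--             i += 1
--         else:
--             s.append(dcha[j])
--             j += 1
--
--     return s
-- ===== SOURCE B (Python) =====
-- def _merge(a, b):
--     out = []
--     i, j = 0, 0
--     while i < len(a) and j < len(b):
--         if a[i] < b[j]:
--             out.append(a[i])
--             i += 1
--         else:
--             out.append(b[j])
--             j += 1
--     out.extend(a[i:])
--     out.extend(b[j:])
--     return out
--
--
-- def mezclar(izq, dcha):
--     p = 0
--     while p < len(izq) and izq[p] % 2 != 0:
--         p += 1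
--     q = 0
--     while q < len(dcha) and dcha[q] % 2 != 0:
--         q += 1
--     return _merge(izq[:p], dcha[:q]) + _merge(izq[p:], dcha[q:])
-- ===== Notes on version B (the rewrite author's own statement) =====
-- stated objective: simpler
-- what changed: Replaces A's single stateful 6-branch while loop with counters by a clean decomposition: measure the leading odd run of each list, then run one standard two-pointer merge (ties to dcha) on the odd prefixes and another on the tails, concatenating the results.
import Mathlib
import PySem

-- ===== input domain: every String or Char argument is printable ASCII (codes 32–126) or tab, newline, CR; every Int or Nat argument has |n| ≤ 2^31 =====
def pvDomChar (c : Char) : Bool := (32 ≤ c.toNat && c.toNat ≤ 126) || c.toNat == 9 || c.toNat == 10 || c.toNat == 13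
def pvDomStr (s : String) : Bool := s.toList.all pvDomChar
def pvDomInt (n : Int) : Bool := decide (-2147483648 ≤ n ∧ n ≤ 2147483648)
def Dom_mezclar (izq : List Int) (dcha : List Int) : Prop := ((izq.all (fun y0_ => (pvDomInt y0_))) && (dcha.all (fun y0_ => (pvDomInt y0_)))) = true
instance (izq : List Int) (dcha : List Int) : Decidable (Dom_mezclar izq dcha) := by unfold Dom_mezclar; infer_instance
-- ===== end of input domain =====

-- B replaces A's one stateful 6-branch loop with counters by: odd-run lengths, then two plain
-- two-pointer merges (odd prefixes, then tails), concatenated. Objective: simpler; same cost.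

-- ===== PORT A =====
-- Python's odd(a)/even(a) used in boolean context: truthy iff a % 2 != 0 (resp. == 0).
def pyOdd (a : Int) : Bool := PySem.Int.mod a 2 != 0
def pyEven (a : Int) : Bool := PySem.Int.mod a 2 == 0

-- first while loop of A; indices are always in range when read (xs.getD i 0 = xs[i] there)
def mezclarLoop1 (izq dcha : List Int) (i j ni nj : Nat) (s : List Int) : List Int × Nat × Nat :=
  if (i < izq.length ∧ pyOdd (izq.getD i 0)) ∨ (j < dcha.length ∧ pyOdd (dcha.getD j 0)) then
    if izq.length ≤ i then
      mezclarLoop1 izq dcha i (j+1) ni (nj+1) (s ++ [dcha.getD j 0])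
    else if pyEven (izq.getD i 0) then
      mezclarLoop1 izq dcha i (j+1) ni (nj+1) (s ++ [dcha.getD j 0])
    else if dcha.length ≤ j then
      mezclarLoop1 izq dcha (i+1) j (ni+1) nj (s ++ [izq.getD i 0])
    else if pyEven (dcha.getD j 0) then
      mezclarLoop1 izq dcha (i+1) j (ni+1) nj (s ++ [izq.getD i 0])
    else if izq.getD i 0 < dcha.getD j 0 then
      mezclarLoop1 izq dcha (i+1) j (ni+1) nj (s ++ [izq.getD i 0])
    else
      mezclarLoop1 izq dcha i (j+1) ni (nj+1) (s ++ [dcha.getD j 0])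
  else (s, ni, nj)
termination_by (izq.length - i) + (dcha.length - j)
decreasing_by all_goals (simp [pyOdd, pyEven] at *; omega)

-- second while loop of A
def mezclarLoop2 (izq dcha : List Int) (i j : Nat) (s : List Int) : List Int :=
  if i < izq.length ∨ j < dcha.length then
    if izq.length ≤ i then
      mezclarLoop2 izq dcha i (j+1) (s ++ [dcha.getD j 0])
    else if dcha.length ≤ j then
      mezclarLoop2 izq dcha (i+1) j (s ++ [izq.getD i 0])
    else if izq.getD i 0 < dcha.getD j 0 then
      mezclarLoop2 izq dcha (i+1) j (s ++ [izq.getD i 0])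
    else
      mezclarLoop2 izq dcha i (j+1) (s ++ [dcha.getD j 0])
  else s
termination_by (izq.length - i) + (dcha.length - j)
decreasing_by all_goals omega

def mezclar (izq : List Int) (dcha : List Int) : List Int :=
  let r := mezclarLoop1 izq dcha 0 0 0 0 []
  mezclarLoop2 izq dcha r.2.1 r.2.2 r.1

-- ===== PORT B =====
-- length of the leading run of odd values from index k (B's first two while loops)
def runLen (xs : List Int) (k : Nat) : Nat :=
  if k < xs.length ∧ PySem.Int.mod (xs.getD k 0) 2 ≠ 0 then runLen xs (k+1) else k
termination_by xs.length - k
decreasing_by omega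

-- B's _merge: standard two-pointer merge, ties to b; a[i:] is List.drop i (i : Nat, exact)
def bMerge (a b : List Int) (i j : Nat) (out : List Int) : List Int :=
  if i < a.length ∧ j < b.length then
    if a.getD i 0 < b.getD j 0 then bMerge a b (i+1) j (out ++ [a.getD i 0])
    else bMerge a b i (j+1) (out ++ [b.getD j 0])
  else out ++ a.drop i ++ b.drop j
termination_by (a.length - i) + (b.length - j)
decreasing_by all_goals omega

def mezclar_alt (izq : List Int) (dcha : List Int) : List Int :=
  let p := runLen izq 0
  let q := runLen dcha 0
  bMerge (izq.take p) (dcha.take q) 0 0 [] ++ bMerge (izq.drop p) (dcha.drop q) 0 0 []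

-- ===== PRECONDITION & SPEC =====
def Spec_mezclar (izq : List Int) (dcha : List Int) (out : List Int) : Prop := out = mezclar_alt izq dcha
instance (izq : List Int) (dcha : List Int) (out : List Int) : Decidable (Spec_mezclar izq dcha out) := by unfold Spec_mezclar; infer_instance

-- ===== CLAIM (what is proved, stated in full; the proofs are below) =====
def Claim_equal_mezclar : Prop := ∀ (izq : List Int) (dcha : List Int), Dom_mezclar izq dcha → Spec_mezclar izq dcha (mezclar izq dcha)

-- ===== LEMMAS AND PROOFS =====

-- common cons-based merge (ties to the right list), the value both index loops compute
def mergeL : List Int → List Int → List Int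
  | [], b => b
  | a, [] => a
  | x :: a, y :: b => if x < y then x :: mergeL a (y :: b) else y :: mergeL (x :: a) b

theorem mergeL_nil_left (b : List Int) : mergeL [] b = b := by
  simp [mergeL]

theorem mergeL_nil_right (a : List Int) : mergeL a [] = a := by
  cases a <;> simp [mergeL]

theorem mergeL_cons_lt {x y : Int} (a b : List Int) (h : x < y) :
    mergeL (x :: a) (y :: b) = x :: mergeL a (y :: b) := by
  simp [mergeL, h]

theorem mergeL_cons_ge {x y : Int} (a b : List Int) (h : ¬ x < y) :
    mergeL (x :: a) (y :: b) = y :: mergeL (x :: a) b := by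
  simp [mergeL, h]

theorem bMerge_spec (a b : List Int) (i j : Nat) (out : List Int) :
    bMerge a b i j out = out ++ mergeL (a.drop i) (b.drop j) := by
  fun_induction bMerge a b i j out with
  | case1 i j out h hlt ih =>
    have hi := h.1; have hj := h.2
    rw [List.getD_eq_getElem a 0 hi, List.getD_eq_getElem b 0 hj] at hlt
    rw [ih, List.drop_eq_getElem_cons hi, List.drop_eq_getElem_cons hj,
        mergeL_cons_lt _ _ hlt, ← List.drop_eq_getElem_cons hj,
        List.getD_eq_getElem a 0 hi]
    simp
  | case2 i j out h hlt ih =>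
    have hi := h.1; have hj := h.2
    rw [List.getD_eq_getElem a 0 hi, List.getD_eq_getElem b 0 hj] at hlt
    rw [ih, List.drop_eq_getElem_cons hi, List.drop_eq_getElem_cons hj,
        mergeL_cons_ge _ _ hlt, ← List.drop_eq_getElem_cons hi,
        List.getD_eq_getElem b 0 hj]
    simp
  | case3 i j out h =>
    rcases Decidable.not_and_iff_not_or_not.mp h with h' | h'
    · rw [List.drop_eq_nil_of_le (show a.length ≤ i by omega), mergeL_nil_left]
      simp
    · rw [List.drop_eq_nil_of_le (show b.length ≤ j by omega), mergeL_nil_right]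
      simp

theorem pyOdd_not_even (a : Int) : pyOdd a = !(pyEven a) := rfl

theorem odd_of_not_even {a : Int} (h : ¬ pyEven a = true) : pyOdd a = true := by
  rw [pyOdd_not_even]
  simp only [Bool.not_eq_true] at h
  rw [h]; rfl

theorem not_odd_of_even {a : Int} (h : pyEven a = true) : pyOdd a = false := by
  rw [pyOdd_not_even, h]; rfl

theorem takeWhile_cons_pos {p : Int → Bool} {x : Int} (xs : List Int) (h : p x = true) :
    (x :: xs).takeWhile p = x :: xs.takeWhile p := by
  simp [h]

theorem takeWhile_cons_neg {p : Int → Bool} {x : Int} (xs : List Int) (h : p x = false) :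
    (x :: xs).takeWhile p = [] := by
  simp [h]

theorem runLen_spec (xs : List Int) (k : Nat) :
    runLen xs k = k + ((xs.drop k).takeWhile pyOdd).length := by
  fun_induction runLen xs k with
  | case1 k h ih =>
    have hodd : pyOdd xs[k] = true := by
      have h2 := h.2
      rw [List.getD_eq_getElem xs 0 h.1] at h2
      simpa [pyOdd] using h2
    rw [ih, List.drop_eq_getElem_cons h.1, takeWhile_cons_pos _ hodd]
    simp; omega
  | case2 k h =>
    by_cases hk : k < xs.length
    · have hmod : PySem.Int.mod (xs.getD k 0) 2 = 0 := by
        rcases Decidable.not_and_iff_not_or_not.mp h with h' | h'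
        · exact absurd hk h'
        · exact not_not.mp h'
      have heven : pyOdd xs[k] = false := by
        rw [List.getD_eq_getElem xs 0 hk] at hmod
        apply not_odd_of_even
        simpa [pyEven, PySem.Int.mod_eq_zero_iff_dvd] using hmod
      rw [List.drop_eq_getElem_cons hk, takeWhile_cons_neg _ heven]
      simp
    · rw [List.drop_eq_nil_of_le (by omega)]
      simp

theorem loop2_spec (izq dcha : List Int) (i j : Nat) (s : List Int) :
    mezclarLoop2 izq dcha i j s = s ++ mergeL (izq.drop i) (dcha.drop j) := by
  fun_induction mezclarLoop2 izq dcha i j s with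
  | case1 i j s h h1 ih =>
    have hj : j < dcha.length := by omega
    rw [ih, List.drop_eq_nil_of_le (show izq.length ≤ i by omega),
        List.drop_eq_getElem_cons hj, mergeL_nil_left, mergeL_nil_left,
        ← List.drop_eq_getElem_cons hj, List.getD_eq_getElem dcha 0 hj,
        List.drop_eq_getElem_cons hj]
    simp
  | case2 i j s h h1 h2 ih =>
    have hi : i < izq.length := by omega
    rw [ih, List.drop_eq_nil_of_le (show dcha.length ≤ j by omega),
        List.drop_eq_getElem_cons hi, mergeL_nil_right, mergeL_nil_right,
        List.getD_eq_getElem izq 0 hi]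
    simp
  | case3 i j s h h1 h2 hlt ih =>
    have hi : i < izq.length := by omega
    have hj : j < dcha.length := by omega
    rw [List.getD_eq_getElem izq 0 hi, List.getD_eq_getElem dcha 0 hj] at hlt
    rw [ih, List.drop_eq_getElem_cons hi, List.drop_eq_getElem_cons hj,
        mergeL_cons_lt _ _ hlt, ← List.drop_eq_getElem_cons hj,
        List.getD_eq_getElem izq 0 hi]
    simp
  | case4 i j s h h1 h2 hlt ih =>
    have hi : i < izq.length := by omega
    have hj : j < dcha.length := by omega
    rw [List.getD_eq_getElem izq 0 hi, List.getD_eq_getElem dcha 0 hj] at hlt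
    rw [ih, List.drop_eq_getElem_cons hi, List.drop_eq_getElem_cons hj,
        mergeL_cons_ge _ _ hlt, ← List.drop_eq_getElem_cons hi,
        List.getD_eq_getElem dcha 0 hj]
    simp
  | case5 i j s h =>
    rw [List.drop_eq_nil_of_le (show izq.length ≤ i by omega),
        List.drop_eq_nil_of_le (show dcha.length ≤ j by omega), mergeL_nil_left]
    simp

theorem loop1_spec (izq dcha : List Int) (i j ni nj : Nat) (s : List Int) :
    mezclarLoop1 izq dcha i j ni nj s =
      (s ++ mergeL ((izq.drop i).takeWhile pyOdd) ((dcha.drop j).takeWhile pyOdd),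
       ni + ((izq.drop i).takeWhile pyOdd).length,
       nj + ((dcha.drop j).takeWhile pyOdd).length) := by
  fun_induction mezclarLoop1 izq dcha i j ni nj s with
  | case1 i j ni nj s h h1 ih =>
    have hr := h.resolve_left (fun hc => absurd hc.1 (by omega))
    have hj : j < dcha.length := hr.1
    have hodd : pyOdd dcha[j] = true := by
      rw [List.getD_eq_getElem dcha 0 hj] at hr; exact hr.2
    rw [ih, List.drop_eq_nil_of_le (show izq.length ≤ i by omega),
        List.drop_eq_getElem_cons hj, takeWhile_cons_pos _ hodd,
        List.getD_eq_getElem dcha 0 hj, List.takeWhile_nil, mergeL_nil_left, mergeL_nil_left]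
    simp; omega
  | case2 i j ni nj s h h1 h2 ih =>
    have hi : i < izq.length := by omega
    have heven : pyOdd izq[i] = false := by
      rw [List.getD_eq_getElem izq 0 hi] at h2; exact not_odd_of_even h2
    have hr := h.resolve_left (fun hc => by
      rw [List.getD_eq_getElem izq 0 hi] at hc
      rw [hc.2] at heven; cases heven)
    have hj : j < dcha.length := hr.1
    have hodd : pyOdd dcha[j] = true := by
      rw [List.getD_eq_getElem dcha 0 hj] at hr; exact hr.2
    rw [ih, List.drop_eq_getElem_cons hi, takeWhile_cons_neg _ heven,
        List.drop_eq_getElem_cons hj, takeWhile_cons_pos _ hodd,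
        List.getD_eq_getElem dcha 0 hj, mergeL_nil_left, mergeL_nil_left]
    simp; omega
  | case3 i j ni nj s h h1 h2 h3 ih =>
    have hi : i < izq.length := by omega
    have hodd : pyOdd izq[i] = true := by
      rw [List.getD_eq_getElem izq 0 hi] at h2; exact odd_of_not_even h2
    rw [ih, List.drop_eq_nil_of_le (show dcha.length ≤ j by omega),
        List.drop_eq_getElem_cons hi, takeWhile_cons_pos _ hodd,
        List.getD_eq_getElem izq 0 hi, List.takeWhile_nil, mergeL_nil_right, mergeL_nil_right]
    simp; omega
  | case4 i j ni nj s h h1 h2 h3 h4 ih =>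
    have hi : i < izq.length := by omega
    have hj : j < dcha.length := by omega
    have hodd : pyOdd izq[i] = true := by
      rw [List.getD_eq_getElem izq 0 hi] at h2; exact odd_of_not_even h2
    have heven : pyOdd dcha[j] = false := by
      rw [List.getD_eq_getElem dcha 0 hj] at h4; exact not_odd_of_even h4
    rw [ih, List.drop_eq_getElem_cons hi, takeWhile_cons_pos _ hodd,
        List.drop_eq_getElem_cons hj, takeWhile_cons_neg _ heven,
        List.getD_eq_getElem izq 0 hi, mergeL_nil_right, mergeL_nil_right]
    simp; omega
  | case5 i j ni nj s h h1 h2 h3 h4 hlt ih =>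
    have hi : i < izq.length := by omega
    have hj : j < dcha.length := by omega
    have hoddi : pyOdd izq[i] = true := by
      rw [List.getD_eq_getElem izq 0 hi] at h2; exact odd_of_not_even h2
    have hoddj : pyOdd dcha[j] = true := by
      rw [List.getD_eq_getElem dcha 0 hj] at h4; exact odd_of_not_even h4
    rw [List.getD_eq_getElem izq 0 hi, List.getD_eq_getElem dcha 0 hj] at hlt
    rw [ih, List.drop_eq_getElem_cons hi, takeWhile_cons_pos _ hoddi,
        List.drop_eq_getElem_cons hj, takeWhile_cons_pos _ hoddj,
        mergeL_cons_lt _ _ hlt, List.getD_eq_getElem izq 0 hi]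
    simp; omega
  | case6 i j ni nj s h h1 h2 h3 h4 hlt ih =>
    have hi : i < izq.length := by omega
    have hj : j < dcha.length := by omega
    have hoddi : pyOdd izq[i] = true := by
      rw [List.getD_eq_getElem izq 0 hi] at h2; exact odd_of_not_even h2
    have hoddj : pyOdd dcha[j] = true := by
      rw [List.getD_eq_getElem dcha 0 hj] at h4; exact odd_of_not_even h4
    rw [List.getD_eq_getElem izq 0 hi, List.getD_eq_getElem dcha 0 hj] at hlt
    rw [ih, List.drop_eq_getElem_cons hi, takeWhile_cons_pos _ hoddi,
        List.drop_eq_getElem_cons hj, takeWhile_cons_pos _ hoddj,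
        mergeL_cons_ge _ _ hlt, List.getD_eq_getElem dcha 0 hj]
    simp; omega
  | case7 i j ni nj s h =>
    have hL : (izq.drop i).takeWhile pyOdd = [] := by
      by_cases hi : i < izq.length
      · have hf : pyOdd izq[i] = false := by
          by_contra hc
          exact h (Or.inl ⟨hi, by
            rw [List.getD_eq_getElem izq 0 hi]
            exact Bool.of_not_eq_false hc⟩)
        rw [List.drop_eq_getElem_cons hi, takeWhile_cons_neg _ hf]
      · rw [List.drop_eq_nil_of_le (by omega)]; rfl
    have hR : (dcha.drop j).takeWhile pyOdd = [] := by
      by_cases hj : j < dcha.length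
      · have hf : pyOdd dcha[j] = false := by
          by_contra hc
          exact h (Or.inr ⟨hj, by
            rw [List.getD_eq_getElem dcha 0 hj]
            exact Bool.of_not_eq_false hc⟩)
        rw [List.drop_eq_getElem_cons hj, takeWhile_cons_neg _ hf]
      · rw [List.drop_eq_nil_of_le (by omega)]; rfl
    rw [hL, hR, mergeL_nil_left]
    simp

-- take of takeWhile's length recovers takeWhile
theorem take_takeWhile_len (p : Int → Bool) (xs : List Int) :
    xs.take (xs.takeWhile p).length = xs.takeWhile p := by
  induction xs with
  | nil => rfl
  | cons x xs ih =>
    by_cases h : p x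
    · simp [h, ih]
    · simp [h]

-- ===== VERDICT (by name: the statement is the Claim_ definition above) =====
theorem mezclar_spec : Claim_equal_mezclar := by
  intro izq dcha _
  unfold Spec_mezclar mezclar mezclar_alt
  rw [loop1_spec, runLen_spec, runLen_spec]
  simp only [List.drop_zero, Nat.zero_add, loop2_spec, bMerge_spec]
  rw [take_takeWhile_len, take_takeWhile_len]
  simp
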